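-- pv_equiv track=rewrite | github.com/PongC/SecureCRT-project | SecureCRT-project/new version/CRTproj16.py | calHTforTabs
-- ===== SOURCE A (Python) =====
-- def calHTforTabs(index,numtabs,numlist):
-- 	index=index-1
-- 	cal_size = 0
-- 	cal_head = 0
-- 	cal_tail = 0
-- 	fraction = int(numlist/numtabs)
-- 	remainder = numlist%numtabs
-- 	for i in range(index+1):
-- 		cal_head=cal_tail
-- 		cal_tail=cal_head+fraction
-- 		if(i<remainder):
-- 			cal_tail=cal_tail+1
--
-- 	return cal_head,cal_tail
-- ===== SOURCE B (Python) =====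
-- def calHTforTabs(index, numtabs, numlist):
--     # closed form: after n loop iterations tail = n*fraction + min(n, max(remainder,0))
--     n = index  # the loop runs max(index, 0) times
--     fraction = int(numlist / numtabs)
--     remainder = numlist % numtabs
--     if n <= 0:
--         return 0, 0
--     r = max(remainder, 0)
--     return (n - 1) * fraction + min(n - 1, r), n * fraction + min(n, r)
-- ===== Notes on version B (the rewrite author's own statement) =====
-- stated objective: faster
-- what changed: Replaces the O(index) accumulation loop with a closed-form formula: tail = n*fraction + min(n, max(remainder,0)) and head is the same formula at n-1.
import Mathlib
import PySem

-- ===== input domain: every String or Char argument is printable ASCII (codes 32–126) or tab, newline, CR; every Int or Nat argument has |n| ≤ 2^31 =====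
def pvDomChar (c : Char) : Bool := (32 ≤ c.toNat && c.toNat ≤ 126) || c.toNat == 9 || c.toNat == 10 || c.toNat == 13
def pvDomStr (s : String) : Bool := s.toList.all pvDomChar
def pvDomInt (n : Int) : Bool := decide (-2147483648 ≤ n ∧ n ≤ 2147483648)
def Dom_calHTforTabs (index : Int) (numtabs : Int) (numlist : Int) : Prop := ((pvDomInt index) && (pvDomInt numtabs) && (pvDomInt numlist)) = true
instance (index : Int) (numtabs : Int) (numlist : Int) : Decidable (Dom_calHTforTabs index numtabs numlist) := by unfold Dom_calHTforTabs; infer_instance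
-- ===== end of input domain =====

-- B replaces A's O(index) accumulation loop with a closed-form formula (objective: faster, measured).
-- ===== PORT A =====
-- one loop iteration: cal_head=cal_tail; cal_tail=cal_head+fraction; if i<remainder: cal_tail+=1
def calHTforTabsStep (fraction remainder : Int) (st : Int × Int) (i : Int) : Int × Int :=
  let cal_head := st.2
  let cal_tail := cal_head + fraction
  let cal_tail := if i < remainder then cal_tail + 1 else cal_tail
  (cal_head, cal_tail)

def calHTforTabs (index : Int) (numtabs : Int) (numlist : Int) : List Int :=
  let index := index - 1
  let fraction := PySem.Int.truncdiv numlist numtabs  -- int(numlist/numtabs): exact on |..| ≤ 2^31 < 2^53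
  let remainder := PySem.Int.mod numlist numtabs
  let st := (PySem.List.pyRange 0 (index + 1) 1).foldl (calHTforTabsStep fraction remainder) (0, 0)
  [st.1, st.2]

-- ===== PORT B =====
def calHTforTabs_alt (index : Int) (numtabs : Int) (numlist : Int) : List Int :=
  let n := index
  let fraction := PySem.Int.truncdiv numlist numtabs
  let remainder := PySem.Int.mod numlist numtabs
  if n ≤ 0 then [0, 0]
  else
    let r := max remainder 0
    [(n - 1) * fraction + min (n - 1) r, n * fraction + min n r]

-- ===== PRECONDITION & SPEC =====
-- Python raises ZeroDivisionError when numtabs == 0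
def Pre_calHTforTabs (index : Int) (numtabs : Int) (numlist : Int) : Prop := numtabs ≠ 0
instance (index : Int) (numtabs : Int) (numlist : Int) : Decidable (Pre_calHTforTabs index numtabs numlist) := by unfold Pre_calHTforTabs; infer_instance
def pvWitness_calHTforTabs : Int × Int × Int := (3, 2, 7)

def Spec_calHTforTabs (index : Int) (numtabs : Int) (numlist : Int) (out : List Int) : Prop := out = calHTforTabs_alt index numtabs numlist
instance (index : Int) (numtabs : Int) (numlist : Int) (out : List Int) : Decidable (Spec_calHTforTabs index numtabs numlist out) := by unfold Spec_calHTforTabs; infer_instance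

-- ===== CLAIM (what is proved, stated in full; the proofs are below) =====
def Claim_equal_calHTforTabs : Prop := ∀ (index : Int) (numtabs : Int) (numlist : Int), Dom_calHTforTabs index numtabs numlist → Pre_calHTforTabs index numtabs numlist → Spec_calHTforTabs index numtabs numlist (calHTforTabs index numtabs numlist)

-- ===== LEMMAS AND PROOFS =====
-- loop invariant: after k iterations the state is (T (k-1), T k) with T n = n*f + min n (max r 0)
lemma calHTforTabs_foldl (f r : Int) : ∀ (k : Nat),
    (PySem.List.pyRange 0 (k : Int) 1).foldl (calHTforTabsStep f r) (0, 0)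
      = if k = 0 then (0, 0)
        else (((k : Int) - 1) * f + min ((k : Int) - 1) (max r 0), (k : Int) * f + min (k : Int) (max r 0)) := by
  intro k
  induction k with
  | zero => simp [PySem.List.pyRange_one_eq_nil]
  | succ k ih =>
    rw [show ((k + 1 : Nat) : Int) = (k : Int) + 1 by push_cast; ring,
        PySem.List.pyRange_one_succ_right (by exact_mod_cast Nat.zero_le k),
        List.foldl_append, ih]
    rcases Nat.eq_zero_or_pos k with hk | hk
    · subst hk
      simp only [if_pos rfl, if_neg (by omega : ¬ (0 + 1 = 0)), List.foldl_cons,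
        List.foldl_nil, calHTforTabsStep, Nat.cast_zero, Nat.cast_ofNat, Prod.mk.injEq]
      split_ifs with hc <;> constructor <;> omega
    · have hk0 : k ≠ 0 := by omega
      simp only [if_neg hk0, if_neg (by omega : ¬ (k + 1 = 0)), List.foldl_cons,
        List.foldl_nil, calHTforTabsStep, Prod.mk.injEq]
      split_ifs with hc <;> constructor <;> push_cast <;> ring_nf <;> omega

-- ===== VERDICT (by name: the statement is the Claim_ definition above) =====
theorem calHTforTabs_spec : Claim_equal_calHTforTabs := by
  intro index numtabs numlist _ _
  unfold Spec_calHTforTabs calHTforTabs calHTforTabs_alt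
  dsimp only
  have hrange : PySem.List.pyRange 0 (index - 1 + 1) 1
      = PySem.List.pyRange 0 ((index.toNat : Nat) : Int) 1 := by
    by_cases h : index ≤ 0
    · rw [PySem.List.pyRange_one_eq_nil (by omega),
          PySem.List.pyRange_one_eq_nil (by omega)]
    · congr 1; omega
  rw [hrange, calHTforTabs_foldl]
  split_ifs with h1 h2 h2
  · rfl
  · omega
  · omega
  · have : ((index.toNat : Nat) : Int) = index := by omega
    rw [this]
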